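-- pv_equiv track=rewrite | github.com/matejaroglic/kattis | kattis/SelfsimilarStringsREKURZIJA.py | podobnost
-- ===== SOURCE A (Python) =====
-- def podobnost(niz, stopnja):
--     '''Funkcija dobi nek niz in njegovo največjo možno stopnjo samopodobnosti
--     in vrne njegovo dejansko največjo stopnjo samopodobnosti'''
-- # ustavitveni pogoj
--     if stopnja == 0:
--         return 0
-- # v seznam damo vse podnize dolžine stopnja
--     meja1 = 0
--     meja2 = stopnja
--     sezPodnizov = []
--     for i in range(0,len(niz)-stopnja+1):
--         sezPodnizov.append(niz[meja1+i:meja2+i])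
-- # naredimo množico, da se znebimo podvojenih podnizov. Dovolj je da pogledamo
-- # samo najbolj začetni podniz in preverimo ali se pojavi v preostanku besede
--     mnozica = set(sezPodnizov)
--     for podniz in mnozica:
-- # metoda niz.find(podniz) nam pove prvi indeks na kateremu se v nizu pojavi
-- # podniz (indeks prve črke podniza v nizu)
--         dalje = niz.find(podniz)
--         if podniz not in niz[dalje+1:]:
-- # če se kakšen podniz ne pojavi še kje v nizu znova kličemo funkcijo
-- # podobnost s stopnjo ena manj
--             return podobnost(niz, stopnja - 1)
--     return stopnja
-- ===== SOURCE B (Python) =====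
-- def podobnost(niz, stopnja):
--     '''Largest k <= stopnja such that every substring of length k occurs
--     at least twice in niz (vacuously true when k > len(niz)); 0 at worst.'''
--     k = stopnja
--     while k > 0:
--         counts = {}
--         for i in range(len(niz) - k + 1):
--             sub = niz[i:i + k]
--             counts[sub] = counts.get(sub, 0) + 1
--         if all(c >= 2 for c in counts.values()):
--             return k
--         k -= 1
--     return 0
-- ===== Notes on version B (the rewrite author's own statement) =====
-- stated objective: faster
-- what changed: Replaces A's recursive descent that re-scans the whole string per distinct substring (set + find + membership-in-suffix) with an iterative descending loop that builds one occurrence-count dictionary per length and checks all counts are at least 2, removing the inner per-substring scans.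
-- intended difference: For negative stopnja (a degree of self-similarity is a length, so negative input is a corner no caller specifies) A descends through Python's negative-slice wraparound and returns a negative number (e.g. -2 on ('ab', -1)); B returns 0, the intended floor of the degree. — e.g. on podobnost("ab", -1): A returns -2, B returns 0
import Mathlib
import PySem

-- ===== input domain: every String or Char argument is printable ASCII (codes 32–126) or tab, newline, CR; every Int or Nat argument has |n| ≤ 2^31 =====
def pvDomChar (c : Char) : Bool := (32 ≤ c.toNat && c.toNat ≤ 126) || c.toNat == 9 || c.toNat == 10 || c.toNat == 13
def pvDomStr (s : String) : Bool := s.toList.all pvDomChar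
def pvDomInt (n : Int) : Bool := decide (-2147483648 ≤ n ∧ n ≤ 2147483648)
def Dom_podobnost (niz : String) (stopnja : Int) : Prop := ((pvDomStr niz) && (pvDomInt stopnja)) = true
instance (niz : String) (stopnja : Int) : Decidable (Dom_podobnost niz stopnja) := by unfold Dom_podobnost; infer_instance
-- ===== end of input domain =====

-- B replaces A's recursion with per-distinct-substring find/membership rescans by a descending loop
-- that counts all substring occurrences in one dictionary pass per length (equal outside D_).

-- ===== PORT A =====
-- the body of A's 'for podniz in mnozica: if …: return podobnost(niz, stopnja-1)'; the early return
-- does not depend on the set's (unmodelled) iteration order, so the loop is ported as 'Set.any'.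
def podobnostFail (niz podniz : String) : Bool :=
  !(PySem.Str.isIn podniz (PySem.Str.slice niz (some (PySem.Str.find niz podniz + 1)) none))

-- A's recursion on stopnja - 1, made total by a fuel counter; podobnost passes enough fuel that
-- the 0-fuel branch is never reached (Python's recursion always stops by stopnja = -len(niz)).
def podobnostFuel (niz : String) : Nat → Int → Int
  | 0, stopnja => stopnja
  | fuel + 1, stopnja =>
    if stopnja = 0 then 0
    else
      let sezPodnizov : List String :=
        (PySem.List.pyRange 0 (PySem.Str.len niz - stopnja + 1)).foldl
          (fun acc i => acc ++ [PySem.Str.slice niz (some (0 + i)) (some (stopnja + i))]) []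
      let mnozica := PySem.Set.ofList sezPodnizov
      if mnozica.any (fun podniz => podobnostFail niz podniz) then
        podobnostFuel niz fuel (stopnja - 1)
      else stopnja

def podobnost (niz : String) (stopnja : Int) : Int :=
  podobnostFuel niz ((stopnja + PySem.Str.len niz + 1).toNat + 1) stopnja

-- ===== PORT B =====
-- B's 'while k > 0: … k -= 1' loop, as structural recursion on k (k = stopnja.toNat; 0 when k <= 0)
def podobnost_altGo (niz : String) : Nat → Int
  | 0 => 0
  | k + 1 =>
    let kk : Int := (k : Int) + 1
    let counts : PySem.Dict String Int :=
      (PySem.List.pyRange 0 (PySem.Str.len niz - kk + 1)).foldl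
        (fun d i =>
          let sub := PySem.Str.slice niz (some i) (some (i + kk))
          d.insert sub (d.getD sub 0 + 1))
        PySem.Dict.empty
    if counts.values.all (fun c => decide (2 ≤ c)) then kk else podobnost_altGo niz k

def podobnost_alt (niz : String) (stopnja : Int) : Int := podobnost_altGo niz stopnja.toNat

-- ===== PRECONDITION & SPEC =====
-- For negative stopnja (a degree of self-similarity is a length, so negative input is a corner no
-- caller specifies) A descends through Python's negative-slice wraparound and returns a negative
-- number (e.g. -2 on ('ab', -1)); B returns 0, the intended floor of the degree.
def D_podobnost (niz : String) (stopnja : Int) : Prop := stopnja < 0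
instance (niz : String) (stopnja : Int) : Decidable (D_podobnost niz stopnja) := by
  unfold D_podobnost; infer_instance

def Spec_podobnost (niz : String) (stopnja : Int) (out : Int) : Prop :=
  ¬ D_podobnost niz stopnja → out = podobnost_alt niz stopnja
instance (niz : String) (stopnja : Int) (out : Int) : Decidable (Spec_podobnost niz stopnja out) := by
  unfold Spec_podobnost; infer_instance

def pvDiffWitness_podobnost : String × Int := ("ab", -1)
def pvDiffWitnessOut_podobnost : Int × Int := (-2, 0)

-- ===== CLAIM (what is proved, stated in full; the proofs are below) =====
def Claim_unchanged_podobnost : Prop := ∀ (niz : String) (stopnja : Int), Dom_podobnost niz stopnja → Spec_podobnost niz stopnja (podobnost niz stopnja)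
def Claim_changed_podobnost : Prop := Dom_podobnost (pvDiffWitness_podobnost.1) (pvDiffWitness_podobnost.2) ∧ D_podobnost (pvDiffWitness_podobnost.1) (pvDiffWitness_podobnost.2) ∧ podobnost (pvDiffWitness_podobnost.1) (pvDiffWitness_podobnost.2) = pvDiffWitnessOut_podobnost.1 ∧ podobnost_alt (pvDiffWitness_podobnost.1) (pvDiffWitness_podobnost.2) = pvDiffWitnessOut_podobnost.2 ∧ pvDiffWitnessOut_podobnost.1 ≠ pvDiffWitnessOut_podobnost.2
def Claim_exact_podobnost : Prop := ∀ (niz : String) (stopnja : Int), Dom_podobnost niz stopnja → D_podobnost niz stopnja → podobnost niz stopnja ≠ podobnost_alt niz stopnja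

-- ===== LEMMAS AND PROOFS =====

-- the list of all length-K substrings of niz, indexed by Nat start positions
def subsList (niz : String) (K : Nat) : List String :=
  (List.range (niz.toList.length + 1 - K)).map
    (fun i : Nat => PySem.Str.slice niz (some (i : Int)) (some ((i : Int) + (K : Int))))

lemma range_cast_eq (n K : Nat) :
    PySem.List.pyRange 0 ((n : Int) - (K : Int) + 1)
      = (List.range (n + 1 - K)).map (fun i : Nat => (i : Int)) := by
  by_cases h : K ≤ n + 1
  · have he : (n : Int) - (K : Int) + 1 = ((n + 1 - K : Nat) : Int) := by omega
    rw [he, PySem.List.pyRange_zero_natCast]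
  · have h1 : n + 1 - K = 0 := by omega
    have h2 : (n : Int) - (K : Int) + 1 ≤ 0 := by omega
    rw [h1, PySem.List.pyRange_one_eq_nil h2, List.range_zero, List.map_nil]

lemma sez_eq (niz : String) (K : Nat) :
    (PySem.List.pyRange 0 (PySem.Str.len niz - (K : Int) + 1)).foldl
        (fun acc i => acc ++ [PySem.Str.slice niz (some (0 + i)) (some ((K : Int) + i))]) []
      = subsList niz K := by
  rw [PySem.List.foldl_append_singleton_eq_map, List.nil_append, PySem.Str.len_eq,
    range_cast_eq niz.toList.length K, List.map_map]
  exact List.map_congr_left (fun i _ => by simp [add_comm])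

lemma counts_eq (niz : String) (K : Nat) :
    ((PySem.List.pyRange 0 (PySem.Str.len niz - (K : Int) + 1)).foldl
        (fun (d : PySem.Dict String Int) i =>
          let sub := PySem.Str.slice niz (some i) (some (i + (K : Int)))
          d.insert sub (d.getD sub 0 + 1))
        PySem.Dict.empty)
      = PySem.Dict.counter (subsList niz K) := by
  rw [← PySem.Dict.foldl_insert_getD_add_one_eq_counter (subsList niz K),
    show subsList niz K = (List.range (niz.toList.length + 1 - K)).map
      (fun i : Nat => PySem.Str.slice niz (some (i : Int)) (some ((i : Int) + (K : Int)))) from rfl,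
    List.foldl_map, PySem.Str.len_eq, range_cast_eq niz.toList.length K, List.foldl_map]

-- membership in subsList: p is the substring starting at some i with i + K within the string
lemma mem_subsList {niz p : String} {K : Nat} (hp : p ∈ subsList niz K) :
    ∃ i : Nat, i + K ≤ niz.toList.length ∧ (niz.toList.drop i).take K = p.toList := by
  obtain ⟨i, hi, he⟩ := List.mem_map.mp hp
  have hilt := List.mem_range.mp hi
  refine ⟨i, by omega, ?_⟩
  rw [← he, PySem.Str.toList_slice, PySem.Chars.slice_eq_listSlice, PySem.List.slice_natCast_add]

lemma occ_iff {cs p : List Char} {K : Nat} (hlen : p.length = K) (i : Nat) :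
    p <+: cs.drop i ↔ K ≤ cs.length - i ∧ (cs.drop i).take K = p := by
  constructor
  · intro h
    have hle := h.length_le
    rw [List.length_drop, hlen] at hle
    have ht := List.prefix_iff_eq_take.mp h
    rw [hlen] at ht
    exact ⟨hle, ht.symm⟩
  · rintro ⟨_, h⟩
    exact h ▸ List.take_prefix _ _

lemma two_le_countP_of {l : List Nat} {q : Nat → Bool} {a b : Nat}
    (ha : a ∈ l) (hb : b ∈ l) (hne : a ≠ b)
    (hqa : q a = true) (hqb : q b = true) : 2 ≤ l.countP q := by
  induction l with
  | nil => cases ha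
  | cons x xs ih =>
    rw [List.countP_cons]
    rcases List.mem_cons.mp ha with rfl | ha' <;> rcases List.mem_cons.mp hb with rfl | hb'
    · exact absurd rfl hne
    · have h1 : 0 < xs.countP q := List.countP_pos_iff.mpr ⟨b, hb', hqb⟩
      simp only [hqa, if_true]; omega
    · have h1 : 0 < xs.countP q := List.countP_pos_iff.mpr ⟨a, ha', hqa⟩
      simp only [hqb, if_true]; omega
    · have := ih ha' hb'
      omega

lemma exists_two_of_countP {l : List Nat} {q : Nat → Bool}
    (hnd : l.Nodup) (h2 : 2 ≤ l.countP q) :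
    ∃ a ∈ l, ∃ b ∈ l, a ≠ b ∧ q a = true ∧ q b = true := by
  induction l with
  | nil => simp at h2
  | cons x xs ih =>
    obtain ⟨hx, hnd'⟩ := List.nodup_cons.mp hnd
    rw [List.countP_cons] at h2
    by_cases hq : q x = true
    · have h1 : 0 < xs.countP q := by simp only [hq, if_true] at h2; omega
      obtain ⟨b, hb, hqb⟩ := List.countP_pos_iff.mp h1
      exact ⟨x, List.mem_cons_self, b, List.mem_cons_of_mem _ hb,
        fun he => hx (he ▸ hb), hq, hqb⟩
    · have hqf : q x = false := by revert hq; cases q x <;> simp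
      have h2' : 2 ≤ xs.countP q := by simp [hqf] at h2; omega
      obtain ⟨a, ha, b, hb, hne, hqa, hqb⟩ := ih hnd' h2'
      exact ⟨a, List.mem_cons_of_mem _ ha, b, List.mem_cons_of_mem _ hb, hne, hqa, hqb⟩

-- core: A's per-substring test "reoccurs after its first occurrence" holds exactly
-- when the substring occurs at least twice in the substring list
lemma fail_iff {niz p : String} {K : Nat} (hK : 0 < K) (hp : p ∈ subsList niz K) :
    (podobnostFail niz p = false) ↔ 2 ≤ (subsList niz K).count p := by
  obtain ⟨i0, hi0, he0⟩ := mem_subsList hp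
  set cs := niz.toList with hcs
  have hlen : p.toList.length = K := by
    rw [← he0, List.length_take, List.length_drop]; omega
  have hocc0 : p.toList <+: cs.drop i0 := (occ_iff hlen i0).mpr ⟨by omega, he0⟩
  have hinf : p.toList <:+: cs := hocc0.isInfix.trans (List.drop_suffix i0 cs).isInfix
  have hdnn : 0 ≤ PySem.Chars.find cs p.toList := (PySem.Chars.find_nonneg_iff cs p.toList).mpr hinf
  obtain ⟨hD1, hD2⟩ := PySem.Chars.find_spec hdnn
  set D := (PySem.Chars.find cs p.toList).toNat with hD
  have hfail : podobnostFail niz p = false ↔ PySem.Chars.isIn p.toList (cs.drop (D + 1)) = true := by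
    unfold podobnostFail
    rw [Bool.not_eq_false', PySem.Str.isIn_eq, PySem.Str.find_eq, PySem.Str.toList_slice,
      PySem.Chars.slice_eq_listSlice, ← hcs,
      PySem.List.slice_from cs (by omega : (0:Int) ≤ PySem.Chars.find cs p.toList + 1),
      show (PySem.Chars.find cs p.toList + 1).toNat = D + 1 by omega]
  have hqiff : ∀ i ∈ List.range (cs.length + 1 - K),
      (((cs.drop i).take K == p.toList) = true ↔ p.toList <+: cs.drop i) := by
    intro i hi
    have hilt := List.mem_range.mp hi
    rw [beq_iff_eq, occ_iff hlen i]
    exact ⟨fun h => ⟨by omega, h⟩, fun h => h.2⟩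
  have hcount : (subsList niz K).count p
      = (List.range (cs.length + 1 - K)).countP (fun i => (cs.drop i).take K == p.toList) := by
    rw [show subsList niz K = (List.range (cs.length + 1 - K)).map
        (fun i : Nat => PySem.Str.slice niz (some (i : Int)) (some ((i : Int) + (K : Int)))) from rfl,
      List.count_eq_countP, List.countP_map]
    refine List.countP_congr (fun i _ => ?_)
    simp only [Function.comp_apply]
    rw [Bool.eq_iff_iff, beq_iff_eq, beq_iff_eq, ← String.toList_inj,
      PySem.Str.toList_slice, PySem.Chars.slice_eq_listSlice, PySem.List.slice_natCast_add, ← hcs]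
    simp
  have hDmem : D ∈ List.range (cs.length + 1 - K) := by
    have := ((occ_iff hlen D).mp hD1).1
    exact List.mem_range.mpr (by omega)
  constructor
  · intro hf
    obtain ⟨j, hj⟩ := (PySem.Chars.exists_prefix_drop_iff_isIn p.toList (cs.drop (D + 1))).mpr
      (hfail.mp hf)
    rw [List.drop_drop] at hj
    have hE := (occ_iff hlen (D + 1 + j)).mp hj
    rw [hcount]
    refine two_le_countP_of hDmem (b := D + 1 + j) (List.mem_range.mpr (by omega))
      (by omega) ?_ ?_
    · exact (hqiff D hDmem).mpr hD1
    · exact (hqiff _ (List.mem_range.mpr (by omega))).mpr hj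
  · intro h2
    rw [hcount] at h2
    obtain ⟨a, ha, b, hb, hne, hqa, hqb⟩ := exists_two_of_countP (List.nodup_range) h2
    have hoa := (hqiff a ha).mp hqa
    have hob := (hqiff b hb).mp hqb
    have hex : ∃ c, c ≠ D ∧ p.toList <+: cs.drop c := by
      by_cases had : a = D
      · exact ⟨b, fun hbd => hne (by omega), hob⟩
      · exact ⟨a, had, hoa⟩
    obtain ⟨c, hcne, hoc⟩ := hex
    have hcgt : D < c := by
      rcases Nat.lt_or_ge c D with hlt | hge
      · exact absurd hoc (hD2 c hlt)
      · omega
    rw [hfail]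
    refine (PySem.Chars.exists_prefix_drop_iff_isIn p.toList (cs.drop (D + 1))).mp
      ⟨c - (D + 1), ?_⟩
    rw [List.drop_drop, show D + 1 + (c - (D + 1)) = c by omega]
    exact hoc

lemma level_eq (niz : String) (K : Nat) (hK : 0 < K) :
    ((PySem.Set.ofList (subsList niz K)).any (fun p => podobnostFail niz p))
      = !((PySem.Dict.counter (subsList niz K)).values.all (fun c => decide (2 ≤ c))) := by
  rw [List.any_eq_not_all_not,
    PySem.Dict.values_eq_map_keys _ (PySem.Dict.nodup_keys_counter _) 0,
    PySem.Dict.keys_counter, List.all_map]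
  congr 1
  rw [Bool.eq_iff_iff, List.all_eq_true, List.all_eq_true]
  constructor <;> intro h p hp <;>
    have hpL : p ∈ subsList niz K := (PySem.Set.mem_ofList _ _).mp hp
  · have hf : podobnostFail niz p = false := by simpa using h p hp
    have := (fail_iff hK hpL).mp hf
    simp only [Function.comp_apply, PySem.Dict.getD_counter, decide_eq_true_eq]
    exact_mod_cast this
  · have := h p hp
    simp only [Function.comp_apply, PySem.Dict.getD_counter, decide_eq_true_eq] at this
    have hc : 2 ≤ (subsList niz K).count p := by exact_mod_cast this
    simp [(fail_iff hK hpL).mpr hc]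

lemma fuel_eq (niz : String) : ∀ (f : Nat) (stopnja : Int), 0 ≤ stopnja → stopnja.toNat < f →
    podobnostFuel niz f stopnja = podobnost_altGo niz stopnja.toNat := by
  intro f
  induction f with
  | zero => intro stopnja h0 hf; omega
  | succ f ih =>
    intro stopnja h0 hf
    by_cases hz : stopnja = 0
    · subst hz; rfl
    · obtain ⟨k, hk⟩ : ∃ k, stopnja.toNat = k + 1 := ⟨stopnja.toNat - 1, by omega⟩
      have hs : stopnja = ((k + 1 : Nat) : Int) := by omega
      have hc : ((k : Int) + 1) = ((k + 1 : Nat) : Int) := by omega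
      have harg : ((k + 1 : Nat) : Int) - 1 = ((k : Nat) : Int) := by omega
      simp only [podobnostFuel, if_neg hz]
      rw [hk]
      simp only [podobnost_altGo]
      rw [hs, hc, sez_eq niz (k + 1), counts_eq niz (k + 1), level_eq niz (k + 1) (Nat.succ_pos k),
        harg, ih ((k : Nat) : Int) (by omega) (by omega), Int.toNat_natCast]
      cases ((PySem.Dict.counter (subsList niz (k + 1))).values.all (fun c => decide (2 ≤ c)))
      · simp
      · simp

-- on negative stopnja, A's result never exceeds stopnja (it keeps descending)
lemma fuel_le_of_neg (niz : String) : ∀ (f : Nat) (s : Int), s < 0 → podobnostFuel niz f s ≤ s := by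
  intro f
  induction f with
  | zero => intro s _; exact le_refl s
  | succ f ih =>
    intro s hs
    simp only [podobnostFuel, if_neg (by omega : ¬ s = 0)]
    split
    · exact (ih (s - 1) (by omega)).trans (by omega)
    · exact le_refl s

-- ===== VERDICT (by name: the statement is the Claim_ definition above) =====
theorem podobnost_spec : Claim_unchanged_podobnost := by
  intro niz stopnja _
  unfold Spec_podobnost
  intro hnd
  have h0 : 0 ≤ stopnja := by unfold D_podobnost at hnd; omega
  have hlen : 0 ≤ PySem.Str.len niz := by
    rw [PySem.Str.len_eq]; exact Int.natCast_nonneg _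
  unfold podobnost podobnost_alt
  exact fuel_eq niz _ stopnja h0 (by omega)

theorem podobnost_changed : Claim_changed_podobnost := by unfold Claim_changed_podobnost; decide

theorem podobnost_tight : Claim_exact_podobnost := by
  intro niz stopnja _ hD
  unfold D_podobnost at hD
  have hB : podobnost_alt niz stopnja = 0 := by
    unfold podobnost_alt
    rw [show stopnja.toNat = 0 from by omega]
    rfl
  unfold podobnost
  rw [hB]
  have hA := fuel_le_of_neg niz ((stopnja + PySem.Str.len niz + 1).toNat + 1) stopnja hD
  omega
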